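-- pv_equiv track=rewrite | github.com/StarSein/BaekJoon | 백준/Gold/20056. 마법사 상어와 파이어볼/마법사 상어와 파이어볼.py | solution
-- ===== SOURCE A (Python) =====
-- from typing import List, Tuple
--
-- def solution(N: int, M: int, K: int, balls: List[Tuple[int, int, int, int, int]]) -> int:
--     cur_grid = [[[] for j in range(N)] for i in range(N)]
--     nex_grid = [[[] for j in range(N)] for i in range(N)]
--
--     dir_list = [(-1, 0), (-1, 1), (0, 1), (1, 1), (1, 0), (1, -1), (0, -1), (-1, -1)]
--
--     for r, c, m, s, d in balls:
--         cur_grid[r - 1][c - 1] = [(m, s, d)]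
--
--     for _ in range(K):
--         for r in range(N):
--             for c in range(N):
--                 for m, s, d in cur_grid[r][c]:
--                     dr, dc = dir_list[d]
--                     nr = (r + dr * s) % N
--                     nc = (c + dc * s) % N
--                     nex_grid[nr][nc].append((m, s, d))
--
--         for r in range(N):
--             for c in range(N):
--                 ball_cnt = len(nex_grid[r][c])
--                 if ball_cnt < 2:
--                     cur_grid[r][c] = nex_grid[r][c][:]
--                     nex_grid[r][c].clear()
--                     continue
--
--                 m_sum = 0
--                 s_sum = 0
--                 all_odd = True
--                 all_even = True
--                 for m, s, d in nex_grid[r][c]: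
--                     m_sum += m
--                     s_sum += s
--                     if d % 2 == 1:
--                         all_even = False
--                     else:
--                         all_odd = False
--
--                 nex_grid[r][c].clear()
--
--                 m_nex = m_sum // 5
--                 if m_nex == 0:
--                     cur_grid[r][c].clear()
--                 else:
--                     s_nex = s_sum // ball_cnt
--                     dir_range = range(0, 8, 2) if all_odd or all_even else range(1, 8, 2)
--                     cur_grid[r][c] = [(m_nex, s_nex, d_nex) for d_nex in dir_range]
--
--     answer = 0
--     for r in range(N):
--         for c in range(N):
--             answer += sum(m for m, s, d in cur_grid[r][c])
--     return answer
-- ===== SOURCE B (Python) =====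
-- from typing import List, Tuple
--
-- # B: no grids at all — a flat list of fireballs; each turn move every ball, sort the
-- # list by flattened cell index r*N+c, and merge/split by scanning maximal runs of
-- # equal cells (sort-then-scan grouping).
-- def solution(N: int, M: int, K: int, balls: List[Tuple[int, int, int, int, int]]) -> int:
--     dirs = [(-1, 0), (-1, 1), (0, 1), (1, 1), (1, 0), (1, -1), (0, -1), (-1, -1)]
--
--     # one ball per cell initially (a later ball on the same cell replaces the earlier one)
--     placed = {((r - 1) % N, (c - 1) % N): (m, s, d) for r, c, m, s, d in balls}
--     state = [(r, c, m, s, d) for (r, c), (m, s, d) in placed.items()]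
--
--     for _ in range(K):
--         moved = sorted((((r + dirs[d][0] * s) % N, (c + dirs[d][1] * s) % N, m, s, d)
--                         for r, c, m, s, d in state),
--                        key=lambda b: b[0] * N + b[1])
--         state = []
--         i = 0
--         while i < len(moved):
--             j = i
--             while j < len(moved) and moved[j][:2] == moved[i][:2]:
--                 j += 1
--             group = moved[i:j]
--             if j - i == 1:
--                 state.append(group[0])
--             else:
--                 m_nex = sum(g[2] for g in group) // 5
--                 if m_nex != 0:
--                     s_nex = sum(g[3] for g in group) // (j - i)
--                     even = all(g[4] % 2 == 0 for g in group)
--                     odd = all(g[4] % 2 == 1 for g in group)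
--                     first = 0 if even or odd else 1
--                     r, c = group[0][0], group[0][1]
--                     for nd in range(first, 8, 2):
--                         state.append((r, c, m_nex, s_nex, nd))
--             i = j
--     return sum(m for _, _, m, _, _ in state)
-- ===== Notes on version B (the rewrite author's own statement) =====
-- stated objective: alternative
-- what changed: B eliminates A's two dense N x N list-of-list grids and their three full-grid scans per turn: it keeps a flat list of fireballs and each turn moves every ball, sorts the list by flattened cell index r*N+c, and merges/splits by scanning maximal runs of equal cells (sort-then-scan grouping).
-- outside the precondition, e.g. on solution(2, 2, 1, [(1, 1, 5, 1, 99), (1, 1, 7, 1, 0)]): A returns 7, B returns 7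
import Mathlib
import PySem

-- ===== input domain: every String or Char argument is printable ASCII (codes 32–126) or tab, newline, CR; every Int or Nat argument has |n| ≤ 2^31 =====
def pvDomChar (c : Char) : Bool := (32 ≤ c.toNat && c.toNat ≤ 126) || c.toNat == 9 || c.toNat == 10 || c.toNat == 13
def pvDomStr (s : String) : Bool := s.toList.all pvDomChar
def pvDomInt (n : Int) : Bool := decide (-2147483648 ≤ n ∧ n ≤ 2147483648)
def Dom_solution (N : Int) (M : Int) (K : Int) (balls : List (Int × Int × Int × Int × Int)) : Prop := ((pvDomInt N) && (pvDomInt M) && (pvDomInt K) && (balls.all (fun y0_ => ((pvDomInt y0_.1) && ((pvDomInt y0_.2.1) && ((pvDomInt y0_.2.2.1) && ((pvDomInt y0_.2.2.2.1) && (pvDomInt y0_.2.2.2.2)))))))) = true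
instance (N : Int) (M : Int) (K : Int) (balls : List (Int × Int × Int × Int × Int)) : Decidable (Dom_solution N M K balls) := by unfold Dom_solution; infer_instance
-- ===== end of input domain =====

-- B drops A's two dense N×N list-of-list grids entirely: it keeps a flat list of fireballs
-- and, each turn, moves every ball, sorts the list by flattened cell index r*N+c, and
-- merges/splits by scanning maximal runs of equal cells (sort-then-scan grouping).

-- ===== PORT A =====
-- a ball is (m, s, d); A's grid is an N×N list-of-lists of ball lists
abbrev PvB := Int × Int × Int
abbrev PvGrid := List (List (List PvB))

def pvDirList : List (Int × Int) := [(-1,0),(-1,1),(0,1),(1,1),(1,0),(1,-1),(0,-1),(-1,-1)]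

-- dir_list[d] — Python indexing, exact for -8 ≤ d < 8 (guaranteed by Pre_)
def pvDir (d : Int) : Int × Int := PySem.List.pyGetD pvDirList d (0, 0)

-- grid[r][c] and grid[r][c] = v — Python indexing, exact for in-range (possibly negative) indices
def pvRow (g : PvGrid) (r : Int) : List (List PvB) := PySem.List.pyGetD g r []
def pvGetCell (g : PvGrid) (r c : Int) : List PvB := PySem.List.pyGetD (pvRow g r) c []
def pvSetCell (g : PvGrid) (r c : Int) (v : List PvB) : PvGrid :=
  PySem.List.pySetD g r (PySem.List.pySetD (pvRow g r) c v)

-- [[[] for j in range(N)] for i in range(N)]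
def pvMkGrid (N : Int) : PvGrid :=
  (PySem.List.pyRange 0 N 1).map (fun _ => (PySem.List.pyRange 0 N 1).map (fun _ => ([] : List PvB)))

-- body of the scatter loop: append ball b (at cell (r,c)) to nex_grid[nr][nc]
def pvScatterStep (N r c : Int) (nx : PvGrid) (b : PvB) : PvGrid :=
  let dd := pvDir b.2.2
  let nr := PySem.Int.mod (r + dd.1 * b.2.1) N
  let nc := PySem.Int.mod (c + dd.2 * b.2.1) N
  pvSetCell nx nr nc (pvGetCell nx nr nc ++ [b])

-- body of the merge loop at cell (r,c): writes cur[r][c], clears nex[r][c]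
def pvMergeCellA (st : PvGrid × PvGrid) (r c : Int) : PvGrid × PvGrid :=
  let lst := pvGetCell st.2 r c
  if lst.length < 2 then (pvSetCell st.1 r c lst, pvSetCell st.2 r c [])
  else
    let acc := lst.foldl (fun (t : Int × Int × Bool × Bool) b =>
      (t.1 + b.1, t.2.1 + b.2.1,
       (if PySem.Int.mod b.2.2 2 = 1 then t.2.2.1 else false),
       (if PySem.Int.mod b.2.2 2 = 1 then false else t.2.2.2))) ((0 : Int), (0 : Int), true, true)
    let nex' := pvSetCell st.2 r c []
    let mN := PySem.Int.floordiv acc.1 5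
    if mN = 0 then (pvSetCell st.1 r c [], nex')
    else
      let sN := PySem.Int.floordiv acc.2.1 (lst.length : Int)
      let drs := if acc.2.2.1 || acc.2.2.2 then PySem.List.pyRange 0 8 2 else PySem.List.pyRange 1 8 2
      (pvSetCell st.1 r c (drs.map (fun dn => (mN, sN, dn))), nex')

-- one turn: scatter every ball into nex_grid, then merge/split every cell back into cur_grid
def pvTurnA (N : Int) (st : PvGrid × PvGrid) : PvGrid × PvGrid :=
  let nex1 := (PySem.List.pyRange 0 N 1).foldl (fun nx r =>
    (PySem.List.pyRange 0 N 1).foldl (fun nx c =>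
      (pvGetCell st.1 r c).foldl (pvScatterStep N r c) nx) nx) st.2
  (PySem.List.pyRange 0 N 1).foldl (fun s2 r =>
    (PySem.List.pyRange 0 N 1).foldl (fun s2 c => pvMergeCellA s2 r c) s2) (st.1, nex1)

-- sum(m for m, s, d in lst)
def pvSumM (lst : List PvB) : Int := (lst.map (fun b => b.1)).sum

def solution (N : Int) (M : Int) (K : Int) (balls : List (Int × Int × Int × Int × Int)) : Int :=
  let cur1 := balls.foldl (fun g b =>
    pvSetCell g (b.1 - 1) (b.2.1 - 1) [(b.2.2.1, b.2.2.2.1, b.2.2.2.2)]) (pvMkGrid N)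
  let st := (PySem.List.pyRange 0 K 1).foldl (fun st _ => pvTurnA N st) (cur1, pvMkGrid N)
  (PySem.List.pyRange 0 N 1).foldl (fun a r =>
    (PySem.List.pyRange 0 N 1).foldl (fun a c => a + pvSumM (pvGetCell st.1 r c)) a) 0

-- ===== PORT B =====
-- B's state element is a whole fireball (r, c, m, s, d)
abbrev PvBall5 := Int × Int × Int × Int × Int

def pvCellOf (t : PvBall5) : Int × Int := (t.1, t.2.1)

-- ((r+dirs[d][0]*s)%N, (c+dirs[d][1]*s)%N, m, s, d)
def pvMove (N : Int) (t : PvBall5) : PvBall5 :=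
  let dd := pvDir t.2.2.2.2
  (PySem.Int.mod (t.1 + dd.1 * t.2.2.2.1) N, PySem.Int.mod (t.2.1 + dd.2 * t.2.2.2.1) N,
   t.2.2.1, t.2.2.2.1, t.2.2.2.2)

-- key=lambda b: b[0]*N + b[1]
def pvKeyB (N : Int) (t : PvBall5) : Int := t.1 * N + t.2.1

-- the body of the outer while loop applied to one maximal run (group) of equal cells
def pvEmit (grp : List PvBall5) : List PvBall5 :=
  if grp.length = 1 then grp
  else
    let mN := PySem.Int.floordiv ((grp.map (fun g => g.2.2.1)).sum) 5
    if mN = 0 then []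
    else
      let sN := PySem.Int.floordiv ((grp.map (fun g => g.2.2.2.1)).sum) (grp.length : Int)
      let ev := grp.all (fun g => PySem.Int.mod g.2.2.2.2 2 = 0)
      let od := grp.all (fun g => PySem.Int.mod g.2.2.2.2 2 = 1)
      let first : Int := if ev || od then 0 else 1
      (PySem.List.pyRange first 8 2).map (fun nd => (grp.headI.1, grp.headI.2.1, mN, sN, nd))

-- the two-index while loops: peel off one maximal run of equal cells at a time
def pvRunScan (moved : List PvBall5) : List PvBall5 :=
  match moved with
  | [] => []
  | x :: xs =>
    pvEmit (x :: xs.takeWhile (fun y => pvCellOf y == pvCellOf x)) ++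
      pvRunScan (xs.dropWhile (fun y => pvCellOf y == pvCellOf x))
termination_by moved.length
decreasing_by simpa using Nat.lt_succ_of_le (List.length_dropWhile_le _ xs)

-- one turn: move every ball, sort by flattened cell index, scan the runs
def pvTurnB (N : Int) (st : List PvBall5) : List PvBall5 :=
  pvRunScan (PySem.List.sorted (st.map (pvMove N)) (pvKeyB N))

def solution_alt (N : Int) (M : Int) (K : Int) (balls : List (Int × Int × Int × Int × Int)) : Int :=
  let placed := balls.foldl (fun (d : PySem.Dict (Int × Int) PvB) b =>
    d.insert (PySem.Int.mod (b.1 - 1) N, PySem.Int.mod (b.2.1 - 1) N)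
      (b.2.2.1, b.2.2.2.1, b.2.2.2.2)) PySem.Dict.empty
  let state0 := placed.items.map (fun kv => (kv.1.1, kv.1.2, kv.2.1, kv.2.2.1, kv.2.2.2))
  let stK := (PySem.List.pyRange 0 K 1).foldl (fun st _ => pvTurnB N st) state0
  (stK.map (fun t => t.2.2.1)).sum

-- ===== PRECONDITION & SPEC =====
-- Pre_ excludes the inputs on which A raises — a ball row/column outside Python's index range
-- of the N×N grid (IndexError on cur_grid[r-1][c-1]), or, when K ≥ 1 turns run, a direction d
-- outside dir_list's index range -8..7 (IndexError on dir_list[d]); the direction condition also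
-- excludes the corner where such a ball is shadowed by a later ball on the same cell and A
-- happens to return (B returns the same value there).
def Pre_solution (N : Int) (M : Int) (K : Int) (balls : List (Int × Int × Int × Int × Int)) : Prop :=
  ∀ b ∈ balls, (-N ≤ b.1 - 1 ∧ b.1 - 1 < N) ∧ (-N ≤ b.2.1 - 1 ∧ b.2.1 - 1 < N) ∧
    (K ≤ 0 ∨ (-8 ≤ b.2.2.2.2 ∧ b.2.2.2.2 < 8))
instance (N : Int) (M : Int) (K : Int) (balls : List (Int × Int × Int × Int × Int)) : Decidable (Pre_solution N M K balls) := by unfold Pre_solution; infer_instance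

def pvWitness_solution : Int × Int × Int × (List (Int × Int × Int × Int × Int)) :=
  (4, 7, 2, [(1, 1, 10, 2, 3), (2, 4, 7, 1, 6)])

def Spec_solution (N : Int) (M : Int) (K : Int) (balls : List (Int × Int × Int × Int × Int)) (out : Int) : Prop := out = solution_alt N M K balls
instance (N : Int) (M : Int) (K : Int) (balls : List (Int × Int × Int × Int × Int)) (out : Int) : Decidable (Spec_solution N M K balls out) := by unfold Spec_solution; infer_instance

-- ===== CLAIM (what is proved, stated in full; the proofs are below) =====
def Claim_equal_solution : Prop := ∀ (N : Int) (M : Int) (K : Int) (balls : List (Int × Int × Int × Int × Int)), Dom_solution N M K balls → Pre_solution N M K balls → Spec_solution N M K balls (solution N M K balls)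

-- ===== LEMMAS AND PROOFS =====

-- ---------- indexing infrastructure ----------

lemma pv_pyIdx_mod (n : Nat) (i : Int) (h1 : -(n : Int) ≤ i) (h2 : i < (n : Int)) :
    PySem.List.pyIdx? n i = some (PySem.Int.mod i (n : Int)).toNat := by
  have hmod : PySem.Int.mod i (n : Int) = i % (n : Int) := by
    unfold PySem.Int.mod
    rw [Int.fmod_eq_emod]
    rw [if_pos (Or.inl (by positivity))]
    ring
  by_cases h0 : 0 ≤ i
  · have hv : i % (n : Int) = i := Int.emod_eq_of_lt h0 h2
    unfold PySem.List.pyIdx?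
    rw [if_pos h0, if_pos h2, hmod, hv]
  · have hn : 0 < (n : Int) := by omega
    have e1 : (i + (n : Int)) % (n : Int) = i % (n : Int) := by
      simpa using Int.add_mul_emod_self_left (a := i) (b := (n : Int)) (c := 1)
    have e2 : (i + (n : Int)) % (n : Int) = i + (n : Int) :=
      Int.emod_eq_of_lt (by omega) (by omega)
    unfold PySem.List.pyIdx?
    rw [if_neg h0, if_pos h1, hmod, ← e1, e2]
    congr 1
    omega

lemma pv_pyGetD_mod {α : Type} (xs : List α) (i : Int) (d : α)
    (h1 : -(xs.length : Int) ≤ i) (h2 : i < (xs.length : Int)) :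
    PySem.List.pyGetD xs i d = xs.getD (PySem.Int.mod i (xs.length : Int)).toNat d := by
  unfold PySem.List.pyGetD PySem.List.pyGet?
  rw [pv_pyIdx_mod xs.length i h1 h2]
  simp [List.getD_eq_getElem?_getD]

lemma pv_pySetD_mod {α : Type} (xs : List α) (i : Int) (v : α)
    (h1 : -(xs.length : Int) ≤ i) (h2 : i < (xs.length : Int)) :
    PySem.List.pySetD xs i v = xs.set (PySem.Int.mod i (xs.length : Int)).toNat v := by
  unfold PySem.List.pySetD PySem.List.pySet?
  rw [pv_pyIdx_mod xs.length i h1 h2]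
  simp

lemma pv_mod_id (i N : Int) (h1 : 0 ≤ i) (h2 : i < N) : PySem.Int.mod i N = i := by
  unfold PySem.Int.mod
  rw [Int.fmod_eq_emod, Int.emod_eq_of_lt h1 h2, if_pos (Or.inl (show (0:Int) ≤ N by omega))]
  ring

lemma pv_pyGetD_cases {α : Type} (xs : List α) (i : Int) (d : α) :
    PySem.List.pyGetD xs i d = d ∨ PySem.List.pyGetD xs i d ∈ xs := by
  unfold PySem.List.pyGetD
  cases h : PySem.List.pyGet? xs i with
  | none => left; rfl
  | some a =>
    right
    simp only [Option.getD_some]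
    unfold PySem.List.pyGet? at h
    rcases hidx : PySem.List.pyIdx? xs.length i with _ | k
    · rw [hidx] at h; simp at h
    · rw [hidx] at h
      exact List.mem_of_getElem? (i := k) h

-- ---------- grid infrastructure ----------

def PvWF (N : Int) (g : PvGrid) : Prop :=
  g.length = N.toNat ∧ ∀ row ∈ g, row.length = N.toNat

lemma pv_WF_mkGrid (N : Int) : PvWF N (pvMkGrid N) := by
  constructor
  · simp [pvMkGrid, PySem.List.length_pyRange_one]
  · intro row hrow
    simp only [pvMkGrid, List.mem_map] at hrow
    obtain ⟨r, _, hr⟩ := hrow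
    rw [← hr]
    simp [PySem.List.length_pyRange_one]

lemma pvGetCell_mkGrid (N r c : Int) : pvGetCell (pvMkGrid N) r c = [] := by
  have hinner : ∀ row ∈ pvMkGrid N, ∀ x ∈ row, x = ([] : List PvB) := by
    intro row hrow x hx
    simp only [pvMkGrid, List.mem_map] at hrow
    obtain ⟨a, _, ha⟩ := hrow
    rw [← ha] at hx
    simp only [List.mem_map] at hx
    obtain ⟨b, _, hb⟩ := hx
    exact hb.symm
  unfold pvGetCell pvRow
  rcases pv_pyGetD_cases (pvMkGrid N) r [] with h | h
  · rw [h]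
    rcases pv_pyGetD_cases ([] : List (List PvB)) c [] with h2 | h2
    · exact h2
    · simp at h2
  · rcases pv_pyGetD_cases (PySem.List.pyGetD (pvMkGrid N) r []) c [] with h2 | h2
    · exact h2
    · exact hinner _ h _ h2

lemma pv_row_fact (N : Int) (g : PvGrid) (hWF : PvWF N g) (i : Int)
    (hi : -N ≤ i ∧ i < N) :
    pvRow g i = g.getD (PySem.Int.mod i N).toNat [] ∧ (pvRow g i).length = N.toNat := by
  have hN : 0 < N := by omega
  have hcast : (g.length : Int) = N := by
    rw [hWF.1]; omega
  have h1 : pvRow g i = g.getD (PySem.Int.mod i N).toNat [] := by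
    unfold pvRow
    rw [pv_pyGetD_mod g i [] (by omega) (by omega), hcast]
  have hk : (PySem.Int.mod i N).toNat < g.length := by
    have ha := PySem.Int.mod_nonneg i hN
    have hb := PySem.Int.mod_lt i hN
    omega
  refine ⟨h1, ?_⟩
  rw [h1, List.getD_eq_getElem?_getD, List.getElem?_eq_getElem hk, Option.getD_some]
  exact hWF.2 _ (List.getElem_mem hk)

lemma pv_WF_set (N : Int) (g : PvGrid) (hWF : PvWF N g) (i j : Int) (v : List PvB)
    (hi : -N ≤ i ∧ i < N) (hj : -N ≤ j ∧ j < N) : PvWF N (pvSetCell g i j v) := by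
  have hN : 0 < N := by omega
  have hcast : (g.length : Int) = N := by rw [hWF.1]; omega
  have hrow := pv_row_fact N g hWF i hi
  have hrcast : ((pvRow g i).length : Int) = N := by rw [hrow.2]; omega
  unfold pvSetCell
  rw [pv_pySetD_mod g i _ (by omega) (by omega)]
  constructor
  · simp [List.length_set, hWF.1]
  · intro row hrw
    rcases List.mem_or_eq_of_mem_set hrw with h | h
    · exact hWF.2 _ h
    · rw [h, pv_pySetD_mod (pvRow g i) j v (by omega) (by omega)]
      rw [List.length_set]
      exact hrow.2

lemma pv_get_set (N : Int) (g : PvGrid) (hWF : PvWF N g) (i j : Int) (v : List PvB)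
    (hi : -N ≤ i ∧ i < N) (hj : -N ≤ j ∧ j < N) (r c : Int)
    (hr : 0 ≤ r ∧ r < N) (hc : 0 ≤ c ∧ c < N) :
    pvGetCell (pvSetCell g i j v) r c =
      if (PySem.Int.mod i N, PySem.Int.mod j N) = (r, c) then v else pvGetCell g r c := by
  have hN : 0 < N := by omega
  have hcast : (g.length : Int) = N := by rw [hWF.1]; omega
  have hrow := pv_row_fact N g hWF i hi
  have hrowr := pv_row_fact N g hWF r (by omega)
  have hrcast : ((pvRow g i).length : Int) = N := by rw [hrow.2]; omega
  have hrrcast : ((pvRow g r).length : Int) = N := by rw [hrowr.2]; omega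
  have hmi0 := PySem.Int.mod_nonneg i hN
  have hmi1 := PySem.Int.mod_lt i hN
  have hmj0 := PySem.Int.mod_nonneg j hN
  have hmj1 := PySem.Int.mod_lt j hN
  have hmr : PySem.Int.mod r N = r := pv_mod_id r N hr.1 hr.2
  have hmc : PySem.Int.mod c N = c := pv_mod_id c N hc.1 hc.2
  have hset : pvSetCell g i j v =
      g.set (PySem.Int.mod i N).toNat ((pvRow g i).set (PySem.Int.mod j N).toNat v) := by
    unfold pvSetCell
    rw [pv_pySetD_mod g i _ (by omega) (by omega),
        pv_pySetD_mod (pvRow g i) j v (by omega) (by omega), hcast, hrcast]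
  have hWF' : PvWF N (pvSetCell g i j v) := pv_WF_set N g hWF i j v hi hj
  have hrowr' := pv_row_fact N (pvSetCell g i j v) hWF' r (by omega)
  have hrowval : pvRow (pvSetCell g i j v) r =
      if (PySem.Int.mod i N).toNat = r.toNat
      then (pvRow g i).set (PySem.Int.mod j N).toNat v
      else g.getD r.toNat [] := by
    rw [hrowr'.1, hmr, hset]
    by_cases hh : (PySem.Int.mod i N).toNat = r.toNat
    · rw [if_pos hh, List.getD_eq_getElem?_getD, List.getElem?_set, if_pos hh,
          if_pos (by omega)]
      rfl
    · rw [if_neg hh, List.getD_eq_getElem?_getD, List.getElem?_set, if_neg hh,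
          ← List.getD_eq_getElem?_getD]
  have hrowg : g.getD r.toNat [] = pvRow g r := by
    rw [hrowr.1, hmr]
  unfold pvGetCell
  rw [hrowval]
  by_cases hir : PySem.Int.mod i N = r
  · rw [if_pos (by omega)]
    have hlset : (((pvRow g i).set (PySem.Int.mod j N).toNat v).length : Int) = N := by
      rw [List.length_set]; exact hrcast
    rw [pv_pyGetD_mod _ c [] (by omega) (by omega), hlset, hmc]
    rw [List.getD_eq_getElem?_getD, List.getElem?_set]
    by_cases hjc : PySem.Int.mod j N = c
    · rw [if_pos (by omega), if_pos (by omega), if_pos (by rw [hir, hjc])]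
      rfl
    · rw [if_neg (by omega), ← List.getD_eq_getElem?_getD,
          if_neg (by intro hcon; rw [Prod.mk.injEq] at hcon; exact hjc hcon.2)]
      have hgi_gr : pvRow g i = pvRow g r := by
        rw [hrow.1, hrowr.1, hmr, hir]
      rw [hgi_gr, pv_pyGetD_mod (pvRow g r) c [] (by omega) (by omega), hrrcast, hmc]
  · rw [if_neg (by omega), hrowg,
        if_neg (by intro hcon; rw [Prod.mk.injEq] at hcon; exact hir hcon.1)]

-- ---------- cells enumeration ----------

def pvCells (N : Int) : List (Int × Int) :=
  (PySem.List.pyRange 0 N 1).flatMap (fun r => (PySem.List.pyRange 0 N 1).map (fun c => (r, c)))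

def PvInCell (N : Int) (z : Int × Int) : Prop := 0 ≤ z.1 ∧ z.1 < N ∧ 0 ≤ z.2 ∧ z.2 < N

lemma pv_mem_cells (N : Int) (z : Int × Int) : z ∈ pvCells N ↔ PvInCell N z := by
  unfold pvCells PvInCell
  simp only [List.mem_flatMap, List.mem_map, PySem.List.mem_pyRange_one]
  constructor
  · rintro ⟨r, hr, c, hc, hz⟩
    rw [← hz]
    exact ⟨hr.1, hr.2, hc.1, hc.2⟩
  · intro h
    exact ⟨z.1, ⟨h.1, h.2.1⟩, z.2, ⟨h.2.2.1, h.2.2.2⟩, rfl⟩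

lemma pv_nodup_cells (N : Int) : (pvCells N).Nodup := by
  have h : pvCells N = (PySem.List.pyRange 0 N 1) ×ˢ (PySem.List.pyRange 0 N 1) := rfl
  rw [h]
  exact (PySem.List.nodup_pyRange_one 0 N).product (PySem.List.nodup_pyRange_one 0 N)

lemma pv_foldl_cells {σ : Type} (N : Int) (step : σ → Int × Int → σ) (init : σ) :
    (PySem.List.pyRange 0 N 1).foldl (fun a r =>
      (PySem.List.pyRange 0 N 1).foldl (fun a c => step a (r, c)) a) init =
    (pvCells N).foldl step init := by
  unfold pvCells
  rw [List.foldl_flatMap]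
  simp only [List.foldl_map]

-- ---------- generic permutation lemma: a flatMap over all cells vs over the occupied cells ----------

lemma pv_flatMap_perm {β : Type} (K L : List (Int × Int)) (f g : Int × Int → List β)
    (hL : L.Nodup) (hK : K.Nodup) (hsub : ∀ k ∈ K, k ∈ L)
    (hfg : ∀ a ∈ L, (f a).Perm (g a)) (hz : ∀ a ∈ L, a ∉ K → g a = []) :
    (L.flatMap f).Perm (K.flatMap g) := by
  induction K generalizing L with
  | nil =>
    have hnil : L.flatMap f = [] := by
      rw [List.flatMap_eq_nil_iff]
      intro a ha
      have h1 : (f a).Perm (g a) := hfg a ha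
      have h2 : g a = [] := hz a ha (by simp)
      rw [h2] at h1
      exact h1.eq_nil
    rw [hnil]
    simp
  | cons k K ih =>
    have hkL : k ∈ L := hsub k (by simp)
    have hknK : k ∉ K := (List.nodup_cons.mp hK).1
    have hstep1 : (L.flatMap f).Perm (f k ++ (L.erase k).flatMap f) := by
      have hLp : L.Perm (k :: L.erase k) := List.perm_cons_erase hkL
      have := hLp.flatMap (g := f) (fun a _ => List.Perm.refl _)
      simpa using this
    have hih : ((L.erase k).flatMap f).Perm (K.flatMap g) := by
      refine ih (L.erase k) (hL.erase k) (List.nodup_cons.mp hK).2 ?_ ?_ ?_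
      · intro k' hk'
        rw [hL.mem_erase_iff]
        exact ⟨fun hkk => hknK (hkk ▸ hk'), hsub k' (by simp [hk'])⟩
      · intro a ha
        exact hfg a ((hL.mem_erase_iff.mp ha).2)
      · intro a ha hna
        have hane := hL.mem_erase_iff.mp ha
        exact hz a hane.2 (by simp [hna, hane.1])
    have hfin : (f k ++ (L.erase k).flatMap f).Perm ((k :: K).flatMap g) := by
      simp only [List.flatMap_cons]
      exact (hfg k hkL).append hih
    exact hstep1.trans hfin

-- ---------- the moved-ball view ----------

def pvDest (N : Int) (z : Int × Int) (b : PvB) : Int × Int :=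
  ((PySem.Int.mod (z.1 + (pvDir b.2.2).1 * b.2.1) N),
   (PySem.Int.mod (z.2 + (pvDir b.2.2).2 * b.2.1) N))

lemma pv_scatterStep_eq (N r c : Int) (nx : PvGrid) (b : PvB) :
    pvScatterStep N r c nx b =
      pvSetCell nx (pvDest N (r, c) b).1 (pvDest N (r, c) b).2
        (pvGetCell nx (pvDest N (r, c) b).1 (pvDest N (r, c) b).2 ++ [b]) := rfl

def pvSrcA (N : Int) (cur : PvGrid) : List ((Int × Int) × PvB) :=
  (pvCells N).flatMap (fun z => (pvGetCell cur z.1 z.2).map (fun b => (z, b)))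

def pvIncoming (N : Int) (src : List ((Int × Int) × PvB)) (z : Int × Int) : List PvB :=
  (src.filter (fun zb => pvDest N zb.1 zb.2 == z)).map (fun zb => zb.2)

-- ---------- scatter phase (A) ----------

lemma pv_scatter_char (N : Int) (l : List ((Int × Int) × PvB)) (nx : PvGrid)
    (hWF : PvWF N nx) (hN : 0 < N) :
    PvWF N (l.foldl (fun nx zb => pvScatterStep N zb.1.1 zb.1.2 nx zb.2) nx) ∧
    ∀ r c, 0 ≤ r ∧ r < N → 0 ≤ c ∧ c < N →
      pvGetCell (l.foldl (fun nx zb => pvScatterStep N zb.1.1 zb.1.2 nx zb.2) nx) r c =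
        pvGetCell nx r c ++ pvIncoming N l (r, c) := by
  induction l generalizing nx with
  | nil => exact ⟨hWF, fun r c _ _ => by simp [pvIncoming]⟩
  | cons zb l ih =>
    have hd1 : 0 ≤ (pvDest N zb.1 zb.2).1 ∧ (pvDest N zb.1 zb.2).1 < N :=
      ⟨PySem.Int.mod_nonneg _ hN, PySem.Int.mod_lt _ hN⟩
    have hd2 : 0 ≤ (pvDest N zb.1 zb.2).2 ∧ (pvDest N zb.1 zb.2).2 < N :=
      ⟨PySem.Int.mod_nonneg _ hN, PySem.Int.mod_lt _ hN⟩
    have hstep : pvScatterStep N zb.1.1 zb.1.2 nx zb.2 =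
        pvSetCell nx (pvDest N zb.1 zb.2).1 (pvDest N zb.1 zb.2).2
          (pvGetCell nx (pvDest N zb.1 zb.2).1 (pvDest N zb.1 zb.2).2 ++ [zb.2]) :=
      pv_scatterStep_eq N zb.1.1 zb.1.2 nx zb.2
    have hWF1 : PvWF N (pvScatterStep N zb.1.1 zb.1.2 nx zb.2) := by
      rw [hstep]
      exact pv_WF_set N nx hWF _ _ _ (by omega) (by omega)
    obtain ⟨ihWF, ihget⟩ := ih (pvScatterStep N zb.1.1 zb.1.2 nx zb.2) hWF1
    constructor
    · simpa only [List.foldl_cons] using ihWF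
    · intro r c hr hc
      simp only [List.foldl_cons]
      rw [ihget r c hr hc]
      have hg : pvGetCell (pvScatterStep N zb.1.1 zb.1.2 nx zb.2) r c =
          if pvDest N zb.1 zb.2 = (r, c)
          then pvGetCell nx (pvDest N zb.1 zb.2).1 (pvDest N zb.1 zb.2).2 ++ [zb.2]
          else pvGetCell nx r c := by
        rw [hstep, pv_get_set N nx hWF _ _ _ (by omega) (by omega) r c hr hc,
            pv_mod_id _ _ hd1.1 hd1.2, pv_mod_id _ _ hd2.1 hd2.2]
      have hinc : pvIncoming N (zb :: l) (r, c) =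
          (if pvDest N zb.1 zb.2 = (r, c) then [zb.2] else []) ++ pvIncoming N l (r, c) := by
        unfold pvIncoming
        rw [List.filter_cons]
        by_cases hd : pvDest N zb.1 zb.2 = (r, c)
        · rw [if_pos (by simp [hd]), if_pos hd]
          simp
        · rw [if_neg (by simp [hd]), if_neg hd]
          simp
      rw [hg, hinc]
      by_cases hd : pvDest N zb.1 zb.2 = (r, c)
      · rw [if_pos hd, if_pos hd, hd]
        simp
      · rw [if_neg hd, if_neg hd]
        simp

lemma pv_turnA_nex (N : Int) (st : PvGrid × PvGrid) :
    ((PySem.List.pyRange 0 N 1).foldl (fun nx r =>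
      (PySem.List.pyRange 0 N 1).foldl (fun nx c =>
        (pvGetCell st.1 r c).foldl (pvScatterStep N r c) nx) nx) st.2) =
    (pvSrcA N st.1).foldl (fun nx zb => pvScatterStep N zb.1.1 zb.1.2 nx zb.2) st.2 := by
  have h1 : (PySem.List.pyRange 0 N 1).foldl (fun nx r =>
      (PySem.List.pyRange 0 N 1).foldl (fun nx c =>
        (pvGetCell st.1 r c).foldl (pvScatterStep N r c) nx) nx) st.2 =
      (pvCells N).foldl (fun nx z => (pvGetCell st.1 z.1 z.2).foldl (pvScatterStep N z.1 z.2) nx) st.2 :=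
    pv_foldl_cells N (fun nx z => (pvGetCell st.1 z.1 z.2).foldl (pvScatterStep N z.1 z.2) nx) st.2
  have h2 : (pvSrcA N st.1).foldl (fun nx zb => pvScatterStep N zb.1.1 zb.1.2 nx zb.2) st.2 =
      (pvCells N).foldl (fun nx z => (pvGetCell st.1 z.1 z.2).foldl (pvScatterStep N z.1 z.2) nx) st.2 := by
    unfold pvSrcA
    rw [List.foldl_flatMap]
    congr 1
    funext nx z
    rw [List.foldl_map]
  exact h1.trans h2.symm

-- ---------- merge phase (A's per-cell merge and its order-free form) ----------

def pvMergeA (lst : List PvB) : List PvB :=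
  if lst.length < 2 then lst
  else
    let acc := lst.foldl (fun (t : Int × Int × Bool × Bool) b =>
      (t.1 + b.1, t.2.1 + b.2.1,
       (if PySem.Int.mod b.2.2 2 = 1 then t.2.2.1 else false),
       (if PySem.Int.mod b.2.2 2 = 1 then false else t.2.2.2))) ((0 : Int), (0 : Int), true, true)
    let mN := PySem.Int.floordiv acc.1 5
    if mN = 0 then []
    else
      let sN := PySem.Int.floordiv acc.2.1 (lst.length : Int)
      let drs := if acc.2.2.1 || acc.2.2.2 then PySem.List.pyRange 0 8 2 else PySem.List.pyRange 1 8 2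
      drs.map (fun dn => (mN, sN, dn))

def pvSumS (lst : List PvB) : Int := (lst.map (fun b => b.2.1)).sum

def pvMergeB (lst : List PvB) : List PvB :=
  if lst.length = 1 then lst
  else
    let mN := PySem.Int.floordiv (pvSumM lst) 5
    if mN = 0 then []
    else
      let sN := PySem.Int.floordiv (pvSumS lst) (lst.length : Int)
      let drs := if lst.all (fun b => PySem.Int.mod b.2.2 2 = 0) || lst.all (fun b => PySem.Int.mod b.2.2 2 = 1)
                 then PySem.List.pyRange 0 8 2 else PySem.List.pyRange 1 8 2
      drs.map (fun dn => (mN, sN, dn))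

lemma pv_mergeCellA_eq (st : PvGrid × PvGrid) (r c : Int) :
    pvMergeCellA st r c =
      (pvSetCell st.1 r c (pvMergeA (pvGetCell st.2 r c)), pvSetCell st.2 r c []) := by
  simp only [pvMergeCellA, pvMergeA]
  split_ifs <;> rfl

lemma pv_bool1 (c : Prop) [Decidable c] (p t : Bool) :
    ((if c then p else false) && t) = (p && (decide c && t)) := by
  by_cases hc : c <;> simp [hc]

lemma pv_bool2 (c0 c1 : Prop) [Decidable c0] [Decidable c1] (hiff : ¬ c1 ↔ c0) (q t : Bool) :
    ((if c1 then false else q) && t) = (q && (decide c0 && t)) := by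
  by_cases hc : c1
  · have : ¬ c0 := fun h0 => (hiff.mpr h0) hc
    simp [hc, this]
  · have : c0 := hiff.mp hc
    simp [hc, this]

lemma pv_acc_char (lst : List PvB) (a b : Int) (p q : Bool) :
    lst.foldl (fun (t : Int × Int × Bool × Bool) b =>
      (t.1 + b.1, t.2.1 + b.2.1,
       (if PySem.Int.mod b.2.2 2 = 1 then t.2.2.1 else false),
       (if PySem.Int.mod b.2.2 2 = 1 then false else t.2.2.2))) (a, b, p, q) =
    (a + pvSumM lst, b + pvSumS lst,
     p && lst.all (fun x => PySem.Int.mod x.2.2 2 = 1),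
     q && lst.all (fun x => PySem.Int.mod x.2.2 2 = 0)) := by
  induction lst generalizing a b p q with
  | nil => simp [pvSumM, pvSumS]
  | cons x t ih =>
    have hmod : PySem.Int.mod x.2.2 2 = 0 ∨ PySem.Int.mod x.2.2 2 = 1 := by
      have h1 := PySem.Int.mod_nonneg x.2.2 (show (0:Int) < 2 by norm_num)
      have h2 := PySem.Int.mod_lt x.2.2 (show (0:Int) < 2 by norm_num)
      omega
    have hiff : ¬ (PySem.Int.mod x.2.2 2 = 1) ↔ (PySem.Int.mod x.2.2 2 = 0) := by omega
    have hsm : pvSumM (x :: t) = x.1 + pvSumM t := by unfold pvSumM; simp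
    have hss : pvSumS (x :: t) = x.2.1 + pvSumS t := by unfold pvSumS; simp
    simp only [List.foldl_cons]
    rw [ih]
    simp only [Prod.mk.injEq]
    refine ⟨by rw [hsm]; ring, by rw [hss]; ring, ?_, ?_⟩
    · rw [List.all_cons]
      exact pv_bool1 _ p (t.all _)
    · rw [List.all_cons]
      exact pv_bool2 _ _ hiff q (t.all _)

lemma pv_perm_all {α : Type} (p : α → Bool) {l l' : List α} (h : l.Perm l') :
    l.all p = l'.all p := by
  rw [Bool.eq_iff_iff, List.all_eq_true, List.all_eq_true]
  constructor
  · intro H x hx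
    exact H x (h.mem_iff.mpr hx)
  · intro H x hx
    exact H x (h.mem_iff.mp hx)

lemma pv_mergeAB {l l' : List PvB} (h : l.Perm l') : pvMergeA l = pvMergeB l' := by
  have hlen := h.length_eq
  have hm : pvSumM l = pvSumM l' := by
    unfold pvSumM
    exact List.Perm.sum_eq (h.map (fun b => b.1))
  have hs : pvSumS l = pvSumS l' := by
    unfold pvSumS
    exact List.Perm.sum_eq (h.map (fun b => b.2.1))
  have ho := pv_perm_all (fun x => decide (PySem.Int.mod x.2.2 2 = 1)) h
  have he := pv_perm_all (fun x => decide (PySem.Int.mod x.2.2 2 = 0)) h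
  rcases Nat.lt_or_ge l.length 2 with hl | hl
  · rcases l with _ | ⟨x, l2⟩
    · have hl0' : l' = [] := by
        have h2 := h.symm
        exact h2.eq_nil
      subst hl0'
      rfl
    · rcases l2 with _ | ⟨y, t⟩
      · have hx' : l' = [x] := List.perm_singleton.mp h.symm
        subst hx'
        rfl
      · simp at hl
  · unfold pvMergeA pvMergeB
    rw [if_neg (show ¬ l.length < 2 by omega)]
    simp only [pv_acc_char, zero_add, Bool.true_and]
    rw [hm, hs, ho, he, hlen, Bool.or_comm]
    rw [if_neg (show ¬ l'.length = 1 by omega)]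

-- A's merge fold over a nodup list of in-range cells, pointwise
lemma pv_mergeA_char (N : Int) (ws : List (Int × Int)) (st : PvGrid × PvGrid)
    (hWF1 : PvWF N st.1) (hWF2 : PvWF N st.2)
    (hws : ∀ z ∈ ws, PvInCell N z) (hnd : ws.Nodup) :
    PvWF N ((ws.foldl (fun s2 z => pvMergeCellA s2 z.1 z.2) st).1) ∧
    PvWF N ((ws.foldl (fun s2 z => pvMergeCellA s2 z.1 z.2) st).2) ∧
    ∀ r c, 0 ≤ r ∧ r < N → 0 ≤ c ∧ c < N →
      (pvGetCell ((ws.foldl (fun s2 z => pvMergeCellA s2 z.1 z.2) st).1) r c =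
        if (r, c) ∈ ws then pvMergeA (pvGetCell st.2 r c) else pvGetCell st.1 r c) ∧
      (pvGetCell ((ws.foldl (fun s2 z => pvMergeCellA s2 z.1 z.2) st).2) r c =
        if (r, c) ∈ ws then [] else pvGetCell st.2 r c) := by
  induction ws generalizing st with
  | nil => exact ⟨hWF1, hWF2, fun r c _ _ => ⟨by simp, by simp⟩⟩
  | cons w ws ih =>
    obtain ⟨hw1, hw2, hw3, hw4⟩ := hws w (by simp)
    have hstep := pv_mergeCellA_eq st w.1 w.2
    have hWF1' : PvWF N (pvMergeCellA st w.1 w.2).1 := by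
      rw [hstep]
      exact pv_WF_set N st.1 hWF1 _ _ _ (by omega) (by omega)
    have hWF2' : PvWF N (pvMergeCellA st w.1 w.2).2 := by
      rw [hstep]
      exact pv_WF_set N st.2 hWF2 _ _ _ (by omega) (by omega)
    obtain ⟨jWF1, jWF2, jget⟩ := ih (pvMergeCellA st w.1 w.2) hWF1' hWF2'
      (fun z hz => hws z (by simp [hz])) (List.nodup_cons.mp hnd).2
    refine ⟨by simpa only [List.foldl_cons] using jWF1,
      by simpa only [List.foldl_cons] using jWF2, ?_⟩
    intro r c hr hc
    have hj := jget r c hr hc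
    have hg1 : pvGetCell (pvMergeCellA st w.1 w.2).1 r c =
        if w = (r, c) then pvMergeA (pvGetCell st.2 w.1 w.2) else pvGetCell st.1 r c := by
      rw [hstep]
      show pvGetCell (pvSetCell st.1 w.1 w.2 _) r c = _
      rw [pv_get_set N st.1 hWF1 w.1 w.2 _ (by omega) (by omega) r c hr hc,
          pv_mod_id w.1 N hw1 hw2, pv_mod_id w.2 N hw3 hw4]
    have hg2 : pvGetCell (pvMergeCellA st w.1 w.2).2 r c =
        if w = (r, c) then [] else pvGetCell st.2 r c := by
      rw [hstep]
      show pvGetCell (pvSetCell st.2 w.1 w.2 _) r c = _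
      rw [pv_get_set N st.2 hWF2 w.1 w.2 _ (by omega) (by omega) r c hr hc,
          pv_mod_id w.1 N hw1 hw2, pv_mod_id w.2 N hw3 hw4]
    have hnmem : w ∉ ws := (List.nodup_cons.mp hnd).1
    constructor
    · simp only [List.foldl_cons]
      rw [hj.1]
      by_cases hmem : (r, c) ∈ ws
      · have hne : w ≠ (r, c) := fun he => hnmem (he ▸ hmem)
        rw [if_pos hmem, if_pos (by simp [hmem]), hg2, if_neg hne]
      · by_cases hwe : w = (r, c)
        · rw [if_neg hmem, if_pos (by simp [hwe.symm]), hg1, if_pos hwe, hwe]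
        · have hnin : (r, c) ∉ w :: ws := by
            intro hcon
            rcases List.mem_cons.mp hcon with h | h
            · exact hwe h.symm
            · exact hmem h
          rw [if_neg hmem, hg1, if_neg hwe, if_neg hnin]
    · simp only [List.foldl_cons]
      rw [hj.2]
      by_cases hmem : (r, c) ∈ ws
      · have hne : w ≠ (r, c) := fun he => hnmem (he ▸ hmem)
        rw [if_pos hmem, if_pos (by simp [hmem])]
      · by_cases hwe : w = (r, c)
        · rw [if_neg hmem, if_pos (by simp [hwe.symm]), hg2, if_pos hwe]
        · have hnin : (r, c) ∉ w :: ws := by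
            intro hcon
            rcases List.mem_cons.mp hcon with h | h
            · exact hwe h.symm
            · exact hmem h
          rw [if_neg hmem, hg2, if_neg hwe, if_neg hnin]

-- ---------- B-side: pairs view, key injectivity, run scan ----------

def pvToPair (t : PvBall5) : (Int × Int) × PvB := ((t.1, t.2.1), t.2.2)

lemma pv_key_eq_iff (N : Int) (hN : 0 < N) (a b : PvBall5)
    (ha : PvInCell N (pvCellOf a)) (hb : PvInCell N (pvCellOf b)) :
    pvKeyB N a = pvKeyB N b ↔ pvCellOf a = pvCellOf b := by
  obtain ⟨a1, a2, a3, a4⟩ := ha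
  obtain ⟨b1, b2, b3, b4⟩ := hb
  unfold pvKeyB pvCellOf at *
  simp only at a1 a2 a3 a4 b1 b2 b3 b4
  constructor
  · intro hk
    have h1 : a.1 = b.1 := by
      rcases lt_trichotomy a.1 b.1 with h | h | h
      · exfalso; nlinarith
      · exact h
      · exfalso; nlinarith
    rw [h1] at hk
    rw [Prod.mk.injEq]
    exact ⟨h1, by omega⟩
  · intro hc
    rw [Prod.mk.injEq] at hc
    rw [hc.1, hc.2]

-- rcells: the distinct cells of a run-grouped list, in run order
def pvRCells (l : List PvBall5) : List (Int × Int) :=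
  match l with
  | [] => []
  | x :: xs => pvCellOf x :: pvRCells (xs.dropWhile (fun y => pvCellOf y == pvCellOf x))
termination_by l.length
decreasing_by simpa using Nat.lt_succ_of_le (List.length_dropWhile_le _ xs)

lemma pv_runScan_char (N : Int) (hN : 0 < N) (l : List PvBall5)
    (hpw : l.Pairwise (fun a b => pvKeyB N a ≤ pvKeyB N b))
    (hin : ∀ t ∈ l, PvInCell N (pvCellOf t)) :
    (∀ z ∈ pvRCells l, ∃ t ∈ l, z = pvCellOf t) ∧
    (pvRCells l).Nodup ∧
    (∀ t ∈ l, pvCellOf t ∈ pvRCells l) ∧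
    pvRunScan l = (pvRCells l).flatMap (fun z => pvEmit (l.filter (fun y => pvCellOf y == z))) := by
  induction l using pvRunScan.induct with
  | case1 => exact ⟨by simp [pvRCells], by simp [pvRCells], by simp, by simp [pvRunScan, pvRCells]⟩
  | case2 x xs ih =>
    set p := fun y => pvCellOf y == pvCellOf x with hp
    set tk := xs.takeWhile p with htk
    set rest := xs.dropWhile p with hrest
    have hsplit : tk ++ rest = xs := List.takeWhile_append_dropWhile
    have hxs_pw : xs.Pairwise (fun a b => pvKeyB N a ≤ pvKeyB N b) :=
      (List.pairwise_cons.mp hpw).2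
    have hx_rel : ∀ y ∈ xs, pvKeyB N x ≤ pvKeyB N y := (List.pairwise_cons.mp hpw).1
    have hrest_sub : rest.Sublist xs := List.dropWhile_sublist p
    have hrest_pw : rest.Pairwise (fun a b => pvKeyB N a ≤ pvKeyB N b) :=
      hxs_pw.sublist hrest_sub
    have hin_xs : ∀ t ∈ xs, PvInCell N (pvCellOf t) := fun t ht => hin t (by simp [ht])
    have hin_rest : ∀ t ∈ rest, PvInCell N (pvCellOf t) :=
      fun t ht => hin_xs t (hrest_sub.subset ht)
    have hx_in : PvInCell N (pvCellOf x) := hin x (by simp)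
    -- every element of rest has a cell different from x's
    have hrest_not : ∀ y ∈ rest, pvCellOf y ≠ pvCellOf x := by
      intro y hy hcy
      cases hr : rest with
      | nil => rw [hr] at hy; simp at hy
      | cons z r' =>
        have hz_not : p z = false := by
          have := List.head?_dropWhile_not p xs
          rw [← hrest, hr] at this
          simpa using this
        have hz_in : z ∈ xs := hrest_sub.subset (by rw [hr]; simp)
        have hy_in : y ∈ xs := hrest_sub.subset hy
        have hxz : pvKeyB N x ≤ pvKeyB N z := hx_rel z hz_in
        have hzy : pvKeyB N z ≤ pvKeyB N y := by
          rw [hr] at hy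
          rcases List.mem_cons.mp hy with h | h
          · rw [h]
          · have := List.pairwise_cons.mp (by rw [hr] at hrest_pw; exact hrest_pw)
            exact this.1 y h
        have hyx : pvKeyB N y = pvKeyB N x :=
          (pv_key_eq_iff N hN y x (hin_xs y hy_in) hx_in).mpr hcy
        have hzx : pvKeyB N z = pvKeyB N x := by omega
        have : pvCellOf z = pvCellOf x :=
          (pv_key_eq_iff N hN z x (hin_xs z hz_in) hx_in).mp hzx
        rw [hp] at hz_not
        exact absurd this (by simpa using hz_not)
    have htk_cell : ∀ y ∈ tk, pvCellOf y = pvCellOf x := by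
      intro y hy
      have := List.mem_takeWhile_imp hy
      rw [hp] at this
      simpa using this
    obtain ⟨ih1, ih2, ih3, ih4⟩ := ih hrest_pw hin_rest
    -- filter facts
    have hfilter_main : (x :: xs).filter (fun y => pvCellOf y == pvCellOf x) = x :: tk := by
      rw [List.filter_cons, if_pos (by simp)]
      congr 1
      rw [← hsplit, List.filter_append]
      have h1 : tk.filter p = tk := List.filter_eq_self.mpr (fun a ha => List.mem_takeWhile_imp ha)
      have h2 : rest.filter p = [] := by
        rw [List.filter_eq_nil_iff]
        intro a ha
        rw [hp]
        simpa using hrest_not a ha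
      rw [hp] at h1 h2
      rw [h1, h2, List.append_nil]
    have hfilter_other : ∀ z, z ≠ pvCellOf x →
        (x :: xs).filter (fun y => pvCellOf y == z) = rest.filter (fun y => pvCellOf y == z) := by
      intro z hz
      rw [List.filter_cons, if_neg (by simpa using fun h => hz h.symm), ← hsplit,
          List.filter_append]
      have h1 : tk.filter (fun y => pvCellOf y == z) = [] := by
        rw [List.filter_eq_nil_iff]
        intro a ha
        simp only [beq_iff_eq]
        rw [htk_cell a ha]
        exact fun h => hz h.symm
      rw [h1, List.nil_append]
    have hrc : pvRCells (x :: xs) = pvCellOf x :: pvRCells rest := by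
      rw [pvRCells]
    refine ⟨?_, ?_, ?_, ?_⟩
    · intro z hz
      rw [hrc] at hz
      rcases List.mem_cons.mp hz with h | h
      · exact ⟨x, by simp, h⟩
      · obtain ⟨t, ht, hzt⟩ := ih1 z h
        exact ⟨t, by simp [hrest_sub.subset ht], hzt⟩
    · rw [hrc, List.nodup_cons]
      refine ⟨?_, ih2⟩
      intro hmem
      obtain ⟨t, ht, hzt⟩ := ih1 _ hmem
      exact hrest_not t ht hzt.symm
    · intro t ht
      rw [hrc]
      rcases List.mem_cons.mp ht with h | h
      · rw [h]; simp
      · rw [← hsplit] at h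
        rcases List.mem_append.mp h with h' | h'
        · rw [htk_cell t h']; simp
        · exact List.mem_cons_of_mem _ (ih3 t h')
    · rw [pvRunScan, hrc, List.flatMap_cons, ← hp, ← htk, ← hrest]
      congr 1
      · rw [hfilter_main]
      · rw [ih4]
        have : ∀ z ∈ pvRCells rest,
            pvEmit ((x :: xs).filter (fun y => pvCellOf y == z)) =
            pvEmit (rest.filter (fun y => pvCellOf y == z)) := by
          intro z hz
          obtain ⟨t, ht, hzt⟩ := ih1 z hz
          rw [hfilter_other z (by rw [hzt]; exact hrest_not t ht)]
        rw [List.flatMap, List.flatMap]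
        congr 1
        exact (List.map_congr_left this).symm

-- emit of a one-cell group, in the pairs view
lemma pv_emit_pairs (z : Int × Int) (grp : List PvBall5)
    (hc : ∀ y ∈ grp, pvCellOf y = z) :
    (pvEmit grp).map pvToPair =
      (pvMergeB (grp.map (fun g => g.2.2))).map (fun b => (z, b)) := by
  cases grp with
  | nil => rfl
  | cons g gt =>
    have hg : ((g.1, g.2.1) : Int × Int) = z := hc g (by simp)
    cases gt with
    | nil =>
      have lhs : pvEmit [g] = [g] := by simp [pvEmit]
      have rhs : pvMergeB [g.2.2] = [g.2.2] := by simp [pvMergeB]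
      rw [lhs]
      rw [show (List.map (fun g => g.2.2) [g] : List PvB) = [g.2.2] from rfl, rhs]
      simp only [List.map_cons, List.map_nil, pvToPair]
      rw [hg]
    | cons g2 t =>
      set L := g :: g2 :: t with hL
      have hlen1 : ¬ L.length = 1 := by simp [hL]
      have hlenm : ¬ (L.map (fun x => x.2.2)).length = 1 := by simp [hL]
      have hm : pvSumM (L.map (fun x => x.2.2)) = (L.map (fun g => g.2.2.1)).sum := by
        unfold pvSumM; rw [List.map_map]; rfl
      have hs : pvSumS (L.map (fun x => x.2.2)) = (L.map (fun g => g.2.2.2.1)).sum := by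
        unfold pvSumS; rw [List.map_map]; rfl
      have he : (L.map (fun x => x.2.2)).all (fun b => PySem.Int.mod b.2.2 2 = 0) =
          L.all (fun g => PySem.Int.mod g.2.2.2.2 2 = 0) := by rw [List.all_map]; rfl
      have ho : (L.map (fun x => x.2.2)).all (fun b => PySem.Int.mod b.2.2 2 = 1) =
          L.all (fun g => PySem.Int.mod g.2.2.2.2 2 = 1) := by rw [List.all_map]; rfl
      have lhsE : pvEmit L =
          if PySem.Int.floordiv ((L.map (fun g => g.2.2.1)).sum) 5 = 0 then []
          else (PySem.List.pyRange
              (if (L.all (fun g => PySem.Int.mod g.2.2.2.2 2 = 0) ||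
                   L.all (fun g => PySem.Int.mod g.2.2.2.2 2 = 1)) then (0:Int) else 1) 8 2).map
            (fun nd => (L.headI.1, L.headI.2.1,
              PySem.Int.floordiv ((L.map (fun g => g.2.2.1)).sum) 5,
              PySem.Int.floordiv ((L.map (fun g => g.2.2.2.1)).sum) (L.length : Int), nd)) := by
        rw [pvEmit, if_neg hlen1]
      have rhsE : pvMergeB (L.map (fun x => x.2.2)) =
          if PySem.Int.floordiv ((L.map (fun g => g.2.2.1)).sum) 5 = 0 then []
          else (if (L.all (fun g => PySem.Int.mod g.2.2.2.2 2 = 0) ||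
                   L.all (fun g => PySem.Int.mod g.2.2.2.2 2 = 1))
                then PySem.List.pyRange 0 8 2 else PySem.List.pyRange 1 8 2).map
            (fun b => (PySem.Int.floordiv ((L.map (fun g => g.2.2.1)).sum) 5,
              PySem.Int.floordiv ((L.map (fun g => g.2.2.2.1)).sum) (L.length : Int), b)) := by
        rw [pvMergeB, if_neg hlenm, hm, hs, he, ho, List.length_map]
      rw [lhsE, rhsE]
      by_cases hz0 : PySem.Int.floordiv ((L.map (fun g => g.2.2.1)).sum) 5 = 0
      · rw [if_pos hz0, if_pos hz0]; rfl
      · rw [if_neg hz0, if_neg hz0]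
        by_cases hpar : (L.all (fun g => PySem.Int.mod g.2.2.2.2 2 = 0) ||
            L.all (fun g => PySem.Int.mod g.2.2.2.2 2 = 1)) = true
        · rw [if_pos hpar, if_pos hpar, List.map_map, List.map_map]
          refine List.map_congr_left (fun nd _ => ?_)
          show pvToPair (L.headI.1, L.headI.2.1, _, _, nd) = (z, _, _, nd)
          unfold pvToPair
          show ((L.headI.1, L.headI.2.1), _, _, nd) = (z, _, _, nd)
          rw [show ((L.headI.1, L.headI.2.1) : Int × Int) = z from hg]
        · rw [if_neg hpar, if_neg hpar, List.map_map, List.map_map]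
          refine List.map_congr_left (fun nd _ => ?_)
          show pvToPair (L.headI.1, L.headI.2.1, _, _, nd) = (z, _, _, nd)
          unfold pvToPair
          show ((L.headI.1, L.headI.2.1), _, _, nd) = (z, _, _, nd)
          rw [show ((L.headI.1, L.headI.2.1) : Int × Int) = z from hg]

-- ---------- the invariant ----------

def PvInv (N : Int) (cur : PvGrid) (st : List PvBall5) : Prop :=
  PvWF N cur ∧ (∀ t ∈ st, PvInCell N (pvCellOf t)) ∧
  (pvSrcA N cur).Perm (st.map pvToPair)

def PvNexE (N : Int) (nex : PvGrid) : Prop :=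
  PvWF N nex ∧ ∀ r c, 0 ≤ r ∧ r < N → 0 ≤ c ∧ c < N → pvGetCell nex r c = []

lemma pv_srcA_fst (N : Int) (g : PvGrid) :
    ∀ q ∈ pvSrcA N g, PvInCell N q.1 := by
  intro q hq
  unfold pvSrcA at hq
  rw [List.mem_flatMap] at hq
  obtain ⟨z, hz, hq2⟩ := hq
  rw [List.mem_map] at hq2
  obtain ⟨b, _, hb⟩ := hq2
  rw [← hb]
  exact (pv_mem_cells N z).mp hz

lemma pv_turn_inv (N : Int) (cur nex : PvGrid) (st : List PvBall5)
    (hInv : PvInv N cur st) (hNex : PvNexE N nex) :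
    PvInv N (pvTurnA N (cur, nex)).1 (pvTurnB N st) ∧ PvNexE N (pvTurnA N (cur, nex)).2 := by
  obtain ⟨hWFc, hstin, hperm⟩ := hInv
  obtain ⟨hWFn, hnex⟩ := hNex
  by_cases hN : 0 < N
  case neg =>
    have hrange : PySem.List.pyRange 0 N 1 = [] := PySem.List.pyRange_one_eq_nil (by omega)
    have hA : pvTurnA N (cur, nex) = (cur, nex) := by
      unfold pvTurnA
      rw [hrange]
      rfl
    have hst : st = [] := by
      cases hs : st with
      | nil => rfl
      | cons t ts =>
        have := hstin t (by rw [hs]; exact List.mem_cons_self)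
        unfold PvInCell at this
        omega
    have hB : pvTurnB N st = [] := by
      rw [hst]
      show pvRunScan (PySem.List.sorted (([] : List PvBall5).map (pvMove N)) (pvKeyB N)) = []
      rw [show PySem.List.sorted (([] : List PvBall5).map (pvMove N)) (pvKeyB N) = [] from rfl,
          pvRunScan]
    rw [hA, hB]
    exact ⟨⟨hWFc, by simp, by simpa [hst] using hperm⟩, hWFn, hnex⟩
  case pos =>
    -- A side: scatter then merge
    have hscat := pv_scatter_char N (pvSrcA N cur) nex hWFn hN
    set nex1 := (pvSrcA N cur).foldl (fun nx zb => pvScatterStep N zb.1.1 zb.1.2 nx zb.2) nex with hnex1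
    have hTA : pvTurnA N (cur, nex) =
        (pvCells N).foldl (fun s2 z => pvMergeCellA s2 z.1 z.2) (cur, nex1) := by
      unfold pvTurnA
      rw [pv_turnA_nex N (cur, nex)]
      exact pv_foldl_cells N (fun s2 z => pvMergeCellA s2 z.1 z.2) _
    have hmerge := pv_mergeA_char N (pvCells N) (cur, nex1) hWFc hscat.1
      (fun z hz => (pv_mem_cells N z).mp hz) (pv_nodup_cells N)
    have hcur2 : ∀ r c, 0 ≤ r ∧ r < N → 0 ≤ c ∧ c < N →
        pvGetCell (pvTurnA N (cur, nex)).1 r c = pvMergeA (pvIncoming N (pvSrcA N cur) (r, c)) := by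
      intro r c hr hc
      rw [hTA, (hmerge.2.2 r c hr hc).1,
          if_pos ((pv_mem_cells N (r, c)).mpr ⟨hr.1, hr.2, hc.1, hc.2⟩)]
      show pvMergeA (pvGetCell nex1 r c) = _
      rw [hscat.2 r c hr hc, hnex r c hr hc, List.nil_append]
    -- A's new sources, as a flatMap over all cells
    have hsrc' : pvSrcA N (pvTurnA N (cur, nex)).1 =
        (pvCells N).flatMap (fun z =>
          (pvMergeA (pvIncoming N (pvSrcA N cur) z)).map (fun b => (z, b))) := by
      unfold pvSrcA
      rw [List.flatMap, List.flatMap]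
      congr 1
      refine List.map_congr_left ?_
      intro z hz
      have hzc := (pv_mem_cells N z).mp hz
      rw [hcur2 z.1 z.2 ⟨hzc.1, hzc.2.1⟩ ⟨hzc.2.2.1, hzc.2.2.2⟩]
      rfl
    -- B side: the sorted moved list
    set moved := PySem.List.sorted (st.map (pvMove N)) (pvKeyB N) with hmoved
    have hmperm : moved.Perm (st.map (pvMove N)) := PySem.List.sorted_perm _ _ _
    have hpw : moved.Pairwise (fun a b => pvKeyB N a ≤ pvKeyB N b) :=
      PySem.List.sorted_pairwise _ _
    have hin_moved : ∀ t ∈ moved, PvInCell N (pvCellOf t) := by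
      intro t ht
      have := hmperm.mem_iff.mp ht
      rw [List.mem_map] at this
      obtain ⟨u, _, hu⟩ := this
      rw [← hu]
      exact ⟨PySem.Int.mod_nonneg _ hN, PySem.Int.mod_lt _ hN,
        PySem.Int.mod_nonneg _ hN, PySem.Int.mod_lt _ hN⟩
    obtain ⟨hc1, hc2, hc3, hc4⟩ := pv_runScan_char N hN moved hpw hin_moved
    -- pairs of the moved list vs destinations of A's sources
    have hpairs : (moved.map pvToPair).Perm
        ((pvSrcA N cur).map (fun zb => (pvDest N zb.1 zb.2, zb.2))) := by
      have h1 : (moved.map pvToPair).Perm ((st.map (pvMove N)).map pvToPair) :=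
        hmperm.map _
      have h2 : (st.map (pvMove N)).map pvToPair =
          (st.map pvToPair).map (fun zb => (pvDest N zb.1 zb.2, zb.2)) := by
        rw [List.map_map, List.map_map]
        rfl
      have h3 : ((st.map pvToPair).map (fun zb => (pvDest N zb.1 zb.2, zb.2))).Perm
          ((pvSrcA N cur).map (fun zb => (pvDest N zb.1 zb.2, zb.2))) :=
        (hperm.map _).symm
      exact (h1.trans (h2 ▸ h3))
    -- the merged groups agree cell by cell
    have hgroup : ∀ z : Int × Int,
        (pvIncoming N (pvSrcA N cur) z).Perm
          ((moved.filter (fun y => pvCellOf y == z)).map (fun g => g.2.2)) := by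
      intro z
      have hA : pvIncoming N (pvSrcA N cur) z =
          (((pvSrcA N cur).map (fun zb => (pvDest N zb.1 zb.2, zb.2))).filter
            (fun q => q.1 == z)).map (fun q => q.2) := by
        unfold pvIncoming
        rw [List.filter_map, List.map_map]
        rfl
      have hB : (moved.filter (fun y => pvCellOf y == z)).map (fun g => g.2.2) =
          ((moved.map pvToPair).filter (fun q => q.1 == z)).map (fun q => q.2) := by
        rw [List.filter_map, List.map_map]
        rfl
      rw [hA, hB]
      exact ((hpairs.symm.filter _).map _)
    -- conclude with the generic flatMap permutation
    have hflat : (pvSrcA N (pvTurnA N (cur, nex)).1).Perm ((pvTurnB N st).map pvToPair) := by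
      rw [hsrc']
      have hBmap : (pvTurnB N st).map pvToPair =
          (pvRCells moved).flatMap (fun z =>
            (pvMergeB ((moved.filter (fun y => pvCellOf y == z)).map (fun g => g.2.2))).map
              (fun b => (z, b))) := by
        show (pvRunScan moved).map pvToPair = _
        rw [hc4, List.map_flatMap]
        rw [List.flatMap, List.flatMap]
        congr 1
        refine List.map_congr_left ?_
        intro z _
        exact pv_emit_pairs z _ (fun y hy => by
          have := List.of_mem_filter hy
          simpa using this)
      rw [hBmap]
      refine pv_flatMap_perm (pvRCells moved) (pvCells N) _ _ (pv_nodup_cells N) hc2 ?_ ?_ ?_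
      · intro k hk
        obtain ⟨t, ht, hkt⟩ := hc1 k hk
        rw [hkt]
        exact (pv_mem_cells N _).mpr (hin_moved t ht)
      · intro z _
        rw [pv_mergeAB (hgroup z)]
      · intro z _ hnz
        have hfil : moved.filter (fun y => pvCellOf y == z) = [] := by
          rw [List.filter_eq_nil_iff]
          intro t ht hbeq
          exact hnz (by
            have : pvCellOf t = z := by simpa using hbeq
            rw [← this]
            exact hc3 t ht)
        rw [hfil]
        rfl
    refine ⟨⟨?_, ?_, hflat⟩, ?_, ?_⟩
    · rw [hTA]
      exact hmerge.1
    · intro t ht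
      have hmem : pvToPair t ∈ (pvTurnB N st).map pvToPair := List.mem_map_of_mem ht
      have := hflat.symm.subset hmem
      have := pv_srcA_fst N (pvTurnA N (cur, nex)).1 _ this
      exact this
    · rw [hTA]
      exact hmerge.2.1
    · intro r c hr hc
      rw [hTA, (hmerge.2.2 r c hr hc).2,
          if_pos ((pv_mem_cells N (r, c)).mpr ⟨hr.1, hr.2, hc.1, hc.2⟩)]

lemma pv_iter_inv (N : Int) (l : List Int) (cur nex : PvGrid) (st : List PvBall5)
    (hInv : PvInv N cur st) (hNex : PvNexE N nex) :
    PvInv N ((l.foldl (fun st _ => pvTurnA N st) (cur, nex)).1)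
      (l.foldl (fun s _ => pvTurnB N s) st) ∧
    PvNexE N ((l.foldl (fun st _ => pvTurnA N st) (cur, nex)).2) := by
  induction l generalizing cur nex st with
  | nil => exact ⟨hInv, hNex⟩
  | cons x l ih =>
    simp only [List.foldl_cons]
    have ht := pv_turn_inv N cur nex st hInv hNex
    exact ih (pvTurnA N (cur, nex)).1 (pvTurnA N (cur, nex)).2 (pvTurnB N st) ht.1 ht.2

-- ---------- initial state ----------

def pvOptList (o : Option PvB) : List PvB := o.elim [] (fun b => [b])

lemma pv_init_inv (N : Int) (balls : List (Int × Int × Int × Int × Int))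
    (hb : ∀ b ∈ balls, (-N ≤ b.1 - 1 ∧ b.1 - 1 < N) ∧ (-N ≤ b.2.1 - 1 ∧ b.2.1 - 1 < N)) :
    PvInv N
      (balls.foldl (fun g b =>
        pvSetCell g (b.1 - 1) (b.2.1 - 1) [(b.2.2.1, b.2.2.2.1, b.2.2.2.2)]) (pvMkGrid N))
      ((balls.foldl (fun (d : PySem.Dict (Int × Int) PvB) b =>
        d.insert (PySem.Int.mod (b.1 - 1) N, PySem.Int.mod (b.2.1 - 1) N)
          (b.2.2.1, b.2.2.2.1, b.2.2.2.2)) PySem.Dict.empty).items.map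
        (fun kv => (kv.1.1, kv.1.2, kv.2.1, kv.2.2.1, kv.2.2.2))) := by
  have main : ∀ (bs : List (Int × Int × Int × Int × Int)) (g : PvGrid)
      (d : PySem.Dict (Int × Int) PvB), PvWF N g → d.keys.Nodup →
      (∀ kv ∈ d.items, PvInCell N kv.1) →
      (∀ r c, 0 ≤ r ∧ r < N → 0 ≤ c ∧ c < N → pvGetCell g r c = pvOptList (d.get? (r, c))) →
      (∀ b ∈ bs, (-N ≤ b.1 - 1 ∧ b.1 - 1 < N) ∧ (-N ≤ b.2.1 - 1 ∧ b.2.1 - 1 < N)) →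
      PvWF N (bs.foldl (fun g b =>
          pvSetCell g (b.1 - 1) (b.2.1 - 1) [(b.2.2.1, b.2.2.2.1, b.2.2.2.2)]) g) ∧
      ((bs.foldl (fun (d : PySem.Dict (Int × Int) PvB) b =>
          d.insert (PySem.Int.mod (b.1 - 1) N, PySem.Int.mod (b.2.1 - 1) N)
            (b.2.2.1, b.2.2.2.1, b.2.2.2.2)) d).keys).Nodup ∧
      (∀ kv ∈ (bs.foldl (fun (d : PySem.Dict (Int × Int) PvB) b =>
          d.insert (PySem.Int.mod (b.1 - 1) N, PySem.Int.mod (b.2.1 - 1) N)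
            (b.2.2.1, b.2.2.2.1, b.2.2.2.2)) d).items, PvInCell N kv.1) ∧
      (∀ r c, 0 ≤ r ∧ r < N → 0 ≤ c ∧ c < N →
        pvGetCell (bs.foldl (fun g b =>
          pvSetCell g (b.1 - 1) (b.2.1 - 1) [(b.2.2.1, b.2.2.2.1, b.2.2.2.2)]) g) r c =
        pvOptList ((bs.foldl (fun (d : PySem.Dict (Int × Int) PvB) b =>
          d.insert (PySem.Int.mod (b.1 - 1) N, PySem.Int.mod (b.2.1 - 1) N)
            (b.2.2.1, b.2.2.2.1, b.2.2.2.2)) d).get? (r, c))) := by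
    intro bs
    induction bs with
    | nil => intro g d h1 h2 h3 h4 _; exact ⟨h1, h2, h3, h4⟩
    | cons b bs ih =>
      intro g d h1 h2 h3 h4 hb5
      simp only [List.foldl_cons]
      obtain ⟨hbb1, hbb2⟩ := hb5 b (by simp)
      have hN : 0 < N := by omega
      refine ih _ _ (pv_WF_set N g h1 _ _ _ (by omega) (by omega))
        (PySem.Dict.nodup_keys_insert _ _ _ h2) ?_ ?_
        (fun b' hb' => hb5 b' (by simp [hb']))
      · intro kv hkv
        rcases (PySem.Dict.mem_items_insert d _ _ kv).mp hkv with h | h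
        · rw [h]
          exact ⟨PySem.Int.mod_nonneg _ hN, PySem.Int.mod_lt _ hN,
            PySem.Int.mod_nonneg _ hN, PySem.Int.mod_lt _ hN⟩
        · exact h3 kv h.1
      · intro r c hr hc
        rw [pv_get_set N g h1 _ _ _ (by omega) (by omega) r c hr hc,
            PySem.Dict.get?_insert]
        by_cases he : (PySem.Int.mod (b.1 - 1) N, PySem.Int.mod (b.2.1 - 1) N) = (r, c)
        · rw [if_pos he, if_pos he.symm]
          rfl
        · rw [if_neg he, if_neg (fun hcon => he hcon.symm), h4 r c hr hc]
  obtain ⟨m1, m2, m3, m4⟩ := main balls (pvMkGrid N) PySem.Dict.empty (pv_WF_mkGrid N)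
    (by simp [PySem.Dict.keys_empty])
    (by intro kv hkv; simp [PySem.Dict.empty] at hkv)
    (by intro r c hr hc; rw [pvGetCell_mkGrid]; rfl)
    hb
  set d1 := balls.foldl (fun (d : PySem.Dict (Int × Int) PvB) b =>
    d.insert (PySem.Int.mod (b.1 - 1) N, PySem.Int.mod (b.2.1 - 1) N)
      (b.2.2.1, b.2.2.2.1, b.2.2.2.2)) PySem.Dict.empty with hd1
  refine ⟨m1, ?_, ?_⟩
  · intro t ht
    rw [List.mem_map] at ht
    obtain ⟨kv, hkv, hkvt⟩ := ht
    have := m3 kv hkv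
    rw [← hkvt]
    exact this
  · -- pvSrcA of the initial grid is a permutation of the dict's items
    have hmapid : (d1.items.map (fun kv => ((kv.1.1, kv.1.2, kv.2.1, kv.2.2.1, kv.2.2.2) : PvBall5))).map pvToPair = d1.items := by
      rw [List.map_map]
      exact (List.map_congr_left (fun kv _ => rfl)).trans (List.map_id _)
    rw [hmapid]
    have hsrc : pvSrcA N (balls.foldl (fun g b =>
        pvSetCell g (b.1 - 1) (b.2.1 - 1) [(b.2.2.1, b.2.2.2.1, b.2.2.2.2)]) (pvMkGrid N)) =
        (pvCells N).flatMap (fun z => (pvOptList (d1.get? z)).map (fun b => (z, b))) := by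
      unfold pvSrcA
      rw [List.flatMap, List.flatMap]
      congr 1
      refine List.map_congr_left ?_
      intro z hz
      have hzc := (pv_mem_cells N z).mp hz
      rw [m4 z.1 z.2 ⟨hzc.1, hzc.2.1⟩ ⟨hzc.2.2.1, hzc.2.2.2⟩]
    rw [hsrc]
    have hitems : d1.keys.flatMap (fun z => (pvOptList (d1.get? z)).map (fun b => (z, b))) =
        d1.items := by
      rw [PySem.Dict.items_eq_map_keys d1 m2 ((0, 0, 0) : PvB)]
      have h : ∀ k ∈ d1.keys, (pvOptList (d1.get? k)).map (fun b => (k, b)) =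
          [(k, d1.getD k ((0, 0, 0) : PvB))] := by
        intro k hk
        cases hg : d1.get? k with
        | none => exact absurd hk ((PySem.Dict.get?_eq_none_iff_not_mem_keys d1 k).mp hg)
        | some v => simp [pvOptList, PySem.Dict.getD, hg]
      calc d1.keys.flatMap (fun z => (pvOptList (d1.get? z)).map (fun b => (z, b)))
          = d1.keys.flatMap (fun k => [(k, d1.getD k ((0, 0, 0) : PvB))]) := by
            rw [List.flatMap, List.flatMap]; congr 1; exact List.map_congr_left h
        _ = (d1.keys.map (fun k => (k, d1.getD k ((0, 0, 0) : PvB)))).flatMap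
              (fun x => [x]) := by rw [List.flatMap_map]
        _ = d1.keys.map (fun k => (k, d1.getD k ((0, 0, 0) : PvB))) :=
            List.flatMap_singleton' _
    rw [← hitems]
    refine pv_flatMap_perm d1.keys (pvCells N) _ _ (pv_nodup_cells N) m2 ?_ ?_ ?_
    · intro k hk
      have hkv : (k, d1.getD k ((0, 0, 0) : PvB)) ∈ d1.items := by
        rw [PySem.Dict.items_eq_map_keys d1 m2 ((0, 0, 0) : PvB)]
        exact List.mem_map.mpr ⟨k, hk, rfl⟩
      exact (pv_mem_cells N k).mpr (m3 _ hkv)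
    · intro a _
      exact List.Perm.refl _
    · intro a _ hna
      have hg : d1.get? a = none := (PySem.Dict.get?_eq_none_iff_not_mem_keys d1 a).mpr hna
      rw [hg]
      rfl

-- ---------- final sum ----------

lemma pv_sum_flatMap {α : Type} (l : List α) (g : α → List Int) :
    (l.flatMap g).sum = (l.map (fun a => (g a).sum)).sum := by
  induction l with
  | nil => simp
  | cons a l ih => simp [List.flatMap_cons, List.sum_append, ih]

lemma pv_final_sum (N : Int) (cur : PvGrid) (st : List PvBall5)
    (hInv : PvInv N cur st) :
    (PySem.List.pyRange 0 N 1).foldl (fun a r =>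
      (PySem.List.pyRange 0 N 1).foldl (fun a c => a + pvSumM (pvGetCell cur r c)) a) 0 =
    (st.map (fun t => t.2.2.1)).sum := by
  obtain ⟨hWF, hin, hperm⟩ := hInv
  have h1 : (PySem.List.pyRange 0 N 1).foldl (fun a r =>
      (PySem.List.pyRange 0 N 1).foldl (fun a c => a + pvSumM (pvGetCell cur r c)) a) 0 =
      (pvCells N).foldl (fun a z => a + pvSumM (pvGetCell cur z.1 z.2)) 0 :=
    pv_foldl_cells N (fun a z => a + pvSumM (pvGetCell cur z.1 z.2)) 0
  have h2 := PySem.List.foldl_add (pvCells N) (fun z => pvSumM (pvGetCell cur z.1 z.2)) 0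
  have hA2 : ((pvSrcA N cur).map (fun zb => zb.2.1)).sum =
      ((pvCells N).map (fun z => pvSumM (pvGetCell cur z.1 z.2))).sum := by
    unfold pvSrcA
    rw [List.map_flatMap, pv_sum_flatMap]
    congr 1
    refine List.map_congr_left ?_
    intro z _
    rw [List.map_map]
    rfl
  have hsum : ((pvSrcA N cur).map (fun zb => zb.2.1)).sum =
      ((st.map pvToPair).map (fun zb => zb.2.1)).sum :=
    (hperm.map (fun zb => zb.2.1)).sum_eq
  have hB : ((st.map pvToPair).map (fun zb => zb.2.1)).sum =
      (st.map (fun t => t.2.2.1)).sum := by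
    rw [List.map_map]
    rfl
  rw [h1, h2, zero_add, ← hA2, hsum, hB]

-- ===== VERDICT (by name: the statement is the Claim_ definition above) =====
theorem solution_spec : Claim_equal_solution := by
  intro N M K balls _hDom hPre
  unfold Spec_solution solution solution_alt
  have hInv0 := pv_init_inv N balls (fun b hb => ⟨(hPre b hb).1, (hPre b hb).2.1⟩)
  have hNex0 : PvNexE N (pvMkGrid N) :=
    ⟨pv_WF_mkGrid N, by intro r c _ _; exact pvGetCell_mkGrid N r c⟩
  have hIter := pv_iter_inv N (PySem.List.pyRange 0 K 1) _ _ _ hInv0 hNex0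
  exact pv_final_sum N _ _ hIter.1
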